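-- pv_equiv track=rewrite | github.com/J-Durham/programming_challenges | python/Expert/consecutive_ascending_numbers/main.py | grouping_handler
-- ===== SOURCE A (Python) =====
-- def grouping_handler(valid_num, divisor):
--   # turn the number into a list, and reset the holder after getting the groups
--   num_list = list(str(valid_num))
--   num_length = len(str(valid_num))
--   split_numbers = []
--   num_holder = ""
--   for i in range(0, num_length):
--     num_holder += num_list[i]
--     if((i + 1) % divisor) == 0:
--       split_numbers.append(num_holder)
--       num_holder = ""
--   return split_numbers
-- ===== SOURCE B (Python) =====
-- def grouping_handler(valid_num, divisor):
--   s = str(valid_num)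
--   return [s[i * divisor:(i + 1) * divisor] for i in range(len(s) // divisor)]
-- ===== Notes on version B (the rewrite author's own statement) =====
-- stated objective: simpler
-- what changed: Replaces the per-character accumulator loop with a modular-boundary test by direct fixed-size slicing: g = len(s)//divisor complete groups, each taken as one slice s[i*divisor:(i+1)*divisor].
-- outside the precondition, e.g. on grouping_handler(1234, -2): A returns ['12', '34'], B returns []
import Mathlib
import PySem

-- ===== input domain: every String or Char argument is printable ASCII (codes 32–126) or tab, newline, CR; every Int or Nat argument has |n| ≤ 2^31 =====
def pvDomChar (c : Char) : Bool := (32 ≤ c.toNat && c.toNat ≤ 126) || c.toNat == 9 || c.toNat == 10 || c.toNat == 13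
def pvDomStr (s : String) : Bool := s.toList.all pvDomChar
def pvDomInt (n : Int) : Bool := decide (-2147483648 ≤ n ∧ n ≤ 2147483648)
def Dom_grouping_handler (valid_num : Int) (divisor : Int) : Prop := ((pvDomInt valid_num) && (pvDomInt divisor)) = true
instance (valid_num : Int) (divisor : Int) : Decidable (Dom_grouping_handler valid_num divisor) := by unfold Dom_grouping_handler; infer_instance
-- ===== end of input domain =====

-- B replaces A's per-character accumulator loop (emit on a modular boundary) by direct
-- fixed-size slicing: len(s) // divisor complete groups, each taken as one slice (objective: simpler).

-- ===== PORT A =====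
-- the loop body: num_holder += num_list[i]; if (i + 1) % divisor == 0: append group, reset holder
def gh_step (num_list : List Char) (divisor : Int) (st : List String × List Char) (i : Int) :
    List String × List Char :=
  let num_holder := st.2 ++ [PySem.List.pyGetD num_list i ' ']
  if PySem.Int.mod (i + 1) divisor = 0 then (st.1 ++ [String.ofList num_holder], [])
  else (st.1, num_holder)

def grouping_handler (valid_num : Int) (divisor : Int) : List String :=
  let num_list := (PySem.Int.toStr valid_num).toList
  let num_length := PySem.Str.len (PySem.Int.toStr valid_num)
  let res := (PySem.List.pyRange 0 num_length 1).foldl (gh_step num_list divisor)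
      (([] : List String), ([] : List Char))
  res.1

-- ===== PORT B =====
def grouping_handler_alt (valid_num : Int) (divisor : Int) : List String :=
  let s := PySem.Int.toStr valid_num
  let g := PySem.Int.floordiv (PySem.Str.len s) divisor
  (PySem.List.pyRange 0 g 1).map
    (fun i => PySem.Str.slice s (some (i * divisor)) (some ((i + 1) * divisor)))

-- ===== PRECONDITION & SPEC =====
-- Pre_ excludes divisor = 0, where A raises ZeroDivisionError, and negative divisors of magnitude
-- at most the digit-string length, where A accidentally groups by |divisor| (sign-of-divisor modulo)
-- while B returns [] — a negative group size is outside the task's natural domain (cite in claim.json).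
def Pre_grouping_handler (valid_num : Int) (divisor : Int) : Prop :=
  0 < divisor ∨ (divisor < 0 ∧ PySem.Str.len (PySem.Int.toStr valid_num) < -divisor)
instance (valid_num : Int) (divisor : Int) : Decidable (Pre_grouping_handler valid_num divisor) := by
  unfold Pre_grouping_handler; infer_instance

def pvWitness_grouping_handler : Int × Int := (123456, 2)

def Spec_grouping_handler (valid_num : Int) (divisor : Int) (out : List String) : Prop := out = grouping_handler_alt valid_num divisor
instance (valid_num : Int) (divisor : Int) (out : List String) : Decidable (Spec_grouping_handler valid_num divisor out) := by unfold Spec_grouping_handler; infer_instance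

-- ===== CLAIM (what is proved, stated in full; the proofs are below) =====
def Claim_equal_grouping_handler : Prop := ∀ (valid_num : Int) (divisor : Int), Dom_grouping_handler valid_num divisor → Pre_grouping_handler valid_num divisor → Spec_grouping_handler valid_num divisor (grouping_handler valid_num divisor)

-- ===== LEMMAS AND PROOFS =====

-- common normal form: the complete size-d chunks of a character list, front to back
def chunksC (d : Nat) (l : List Char) : List String :=
  if _h : 0 < d ∧ d ≤ l.length then
    String.ofList (l.take d) :: chunksC d (l.drop d)
  else []
termination_by l.length
decreasing_by simp; omega

-- A-side, part 1: a run of indices that never hits the modular boundary only grows the holder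
lemma gh_no_emit (num_list : List Char) (divisor : Int) :
    ∀ (k : Nat) (s : Nat) (acc : List String) (holder : List Char),
      s + k ≤ num_list.length →
      (∀ j : Nat, j < k → ¬ (divisor ∣ ((s : Int) + j + 1))) →
      (PySem.List.pyRange (s : Int) ((s : Int) + k) 1).foldl (gh_step num_list divisor) (acc, holder)
        = (acc, holder ++ (num_list.drop s).take k) := by
  intro k
  induction k with
  | zero => intro s acc holder _ _; simp [PySem.List.pyRange_one_eq_nil (le_refl (s : Int))]
  | succ k ih =>
    intro s acc holder hlen hnd
    rw [PySem.List.pyRange_one_cons (by omega), List.foldl_cons]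
    have hstep : gh_step num_list divisor (acc, holder) (s : Int)
        = (acc, holder ++ [PySem.List.pyGetD num_list (s : Int) ' ']) := by
      simp only [gh_step]
      rw [if_neg (by rw [PySem.Int.mod_eq_zero_iff_dvd]; simpa using hnd 0 (by omega))]
    rw [hstep]
    have hcast : (s : Int) + 1 = ((s + 1 : Nat) : Int) := by push_cast; ring
    have hcast2 : (s : Int) + (k + 1 : Nat) = ((s + 1 : Nat) : Int) + (k : Nat) := by push_cast; ring
    rw [hcast2, hcast, ih (s + 1) acc _ (by omega)
      (fun j hj => by
        have h1 := hnd (j + 1) (by omega)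
        intro hdvd; apply h1
        have he : ((s : Int) + (j + 1 : Nat) + 1) = (s : Int) + 1 + j + 1 := by push_cast; ring
        rw [he]; exact hdvd)]
    have hs : s < num_list.length := by omega
    rw [PySem.List.pyGetD_natCast, List.getD_eq_getElem _ _ hs,
      List.drop_eq_getElem_cons hs, List.take_succ_cons, List.append_assoc]
    rfl

-- A-side, part 2: from a boundary-aligned start, the loop produces exactly the complete chunks
lemma gh_loop_chunks (num_list : List Char) (divisor : Int) (hd : 0 < divisor) :
    ∀ (m : Nat) (s : Nat) (acc : List String),
      s + m = num_list.length → divisor ∣ (s : Int) →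
      ((PySem.List.pyRange (s : Int) (num_list.length : Int) 1).foldl
          (gh_step num_list divisor) (acc, [])).1
        = acc ++ chunksC divisor.toNat (num_list.drop s) := by
  intro m
  induction m using Nat.strong_induction_on with
  | _ m ih =>
    intro s acc hsm hdvd
    set d : Nat := divisor.toNat with hdN
    have hdpos : 0 < d := by omega
    have hdcast : (d : Int) = divisor := by omega
    by_cases hcase : d ≤ m
    · -- one full chunk, then recurse
      have hsplit1 : PySem.List.pyRange (s : Int) (num_list.length : Int) 1
          = PySem.List.pyRange (s : Int) ((s : Int) + d) 1
            ++ PySem.List.pyRange ((s : Int) + d) (num_list.length : Int) 1 := by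
        apply PySem.List.pyRange_one_append <;> omega
      have hsplit2 : PySem.List.pyRange (s : Int) ((s : Int) + d) 1
          = PySem.List.pyRange (s : Int) ((s : Int) + (d - 1 : Nat)) 1 ++ [(s : Int) + (d - 1 : Nat)] := by
        have : (s : Int) + d = ((s : Int) + (d - 1 : Nat)) + 1 := by omega
        rw [this, PySem.List.pyRange_one_succ_right (by omega)]
      rw [hsplit1, hsplit2, List.foldl_append, List.foldl_append,
        gh_no_emit num_list divisor (d - 1) s acc [] (by omega)
          (fun j hj hdj => by
            have hj1 : (0 : Int) < (s : Int) + j + 1 - s := by omega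
            have : divisor ∣ ((s : Int) + j + 1 - s) := Int.dvd_sub (by simpa using hdj) hdvd
            have := Int.le_of_dvd hj1 this
            omega)]
      simp only [List.nil_append, List.foldl_cons, List.foldl_nil]
      have hstep : gh_step num_list divisor (acc, (num_list.drop s).take (d - 1)) ((s : Int) + (d - 1 : Nat))
          = (acc ++ [String.ofList ((num_list.drop s).take d)], []) := by
        simp only [gh_step]
        have hidx : (s : Int) + (d - 1 : Nat) = ((s + (d - 1) : Nat) : Int) := by push_cast; ring
        have hin : s + (d - 1) < num_list.length := by omega
        rw [hidx, PySem.List.pyGetD_natCast, List.getD_eq_getElem _ _ hin]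
        have hcond : PySem.Int.mod (((s + (d - 1) : Nat) : Int) + 1) divisor = 0 := by
          rw [PySem.Int.mod_eq_zero_iff_dvd]
          have : (((s + (d - 1) : Nat) : Int) + 1) = (s : Int) + d := by push_cast; omega
          rw [this]; exact Int.dvd_add hdvd (by rw [hdcast])
        rw [if_pos hcond]
        have htake : (num_list.drop s).take (d - 1) ++ [num_list[s + (d - 1)]]
            = (num_list.drop s).take d := by
          have h1 : num_list[s + (d - 1)] = (num_list.drop s)[d - 1]'(by simp; omega) := by
            simp [List.getElem_drop]
          rw [h1]
          conv_rhs => rw [show d = d - 1 + 1 from by omega]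
          exact List.take_concat_get' _ _ (by simp; omega)
        rw [htake]
      rw [hstep]
      have hrec := ih (m - d) (by omega) (s + d) (acc ++ [String.ofList ((num_list.drop s).take d)])
        (by omega) (by push_cast; exact Int.dvd_add hdvd (by rw [hdcast]))
      have hcast3 : ((s + d : Nat) : Int) = (s : Int) + d := by push_cast; ring
      rw [hcast3] at hrec
      rw [hrec, List.append_assoc]
      congr 1
      conv_rhs => rw [chunksC]
      rw [dif_pos ⟨hdpos, by simp; omega⟩, List.drop_drop]
      simp
    · -- fewer than d characters remain: nothing more is emitted
      have hr : (num_list.length : Int) = (s : Int) + m := by omega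
      rw [hr, gh_no_emit num_list divisor m s acc [] (by omega)
        (fun j hj hdj => by
          have hj1 : (0 : Int) < (s : Int) + j + 1 - s := by omega
          have : divisor ∣ ((s : Int) + j + 1 - s) := Int.dvd_sub (by simpa using hdj) hdvd
          have := Int.le_of_dvd hj1 this
          omega)]
      rw [chunksC, dif_neg (by simp; omega)]
      simp

-- B-side: the slice comprehension computes the same chunks
lemma chunks_map (d : Nat) (hd : 0 < d) :
    ∀ (l : List Char),
      (List.range (l.length / d)).map (fun i => String.ofList ((l.drop (i * d)).take d))
        = chunksC d l := by
  intro l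
  induction hl : l.length using Nat.strong_induction_on generalizing l with
  | _ n ih =>
    subst hl
    by_cases hc : d ≤ l.length
    · have hlen : l.length / d = (l.drop d).length / d + 1 := by
        simp only [List.length_drop]
        exact Nat.div_eq_sub_div hd hc
      rw [hlen, List.range_succ_eq_map, List.map_cons, List.map_map]
      conv_rhs => rw [chunksC]
      rw [dif_pos ⟨hd, hc⟩]
      congr 1
      · simp
      · rw [← ih (l.drop d).length (by simp; omega) (l.drop d) rfl]
        apply List.map_congr_left
        intro i _
        simp only [Function.comp]
        rw [List.drop_drop]
        congr 2
        · congr 1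
          simp [Nat.succ_mul, Nat.add_comm]
    · have h0 : l.length / d = 0 := Nat.div_eq_of_lt (by omega)
      rw [h0, chunksC, dif_neg (by omega)]
      simp

lemma str_slice_ofList (s : String) (a b : Int) :
    PySem.Str.slice s (some a) (some b) = String.ofList (PySem.List.slice s.toList (some a) (some b)) := by
  rw [← PySem.Chars.slice_eq_listSlice, ← PySem.Str.toList_slice, String.ofList_toList]

theorem grouping_handler_spec : Claim_equal_grouping_handler := by
  intro valid_num divisor _ hpre
  unfold Pre_grouping_handler at hpre
  unfold Spec_grouping_handler grouping_handler grouping_handler_alt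
  dsimp only
  set L : List Char := (PySem.Int.toStr valid_num).toList with hL
  rw [PySem.Str.len_eq, ← hL] at hpre
  rcases hpre with hpre | ⟨hneg, hshort⟩
  case inr =>
    -- |divisor| exceeds the number of digits: A never hits a boundary, B's range is empty
    have hA := gh_no_emit L divisor L.length 0 [] []
      (by omega)
      (fun j hj hdj => by
        have hd' : (-divisor) ∣ ((0 : Nat) : Int) + j + 1 := (Int.neg_dvd).mpr hdj
        have := Int.le_of_dvd (by push_cast; omega) hd'
        omega)
    have h0 : ((0 : Nat) : Int) = (0 : Int) := by norm_num
    rw [h0] at hA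
    simp only [zero_add] at hA
    rw [PySem.Str.len_eq, ← hL, hA]
    have hg : PySem.Int.floordiv (L.length : Int) divisor ≤ 0 := by
      have h1 := PySem.Int.floordiv_mul_add_mod (L.length : Int) divisor
      have h2 := PySem.Int.mod_neg_bounds (L.length : Int) hneg
      nlinarith [h1, h2.1, h2.2]
    rw [PySem.List.pyRange_one_eq_nil hg]
    simp
  set d : Nat := divisor.toNat with hdN
  have hdpos : 0 < d := by omega
  have hdcast : (d : Int) = divisor := by omega
  -- A's loop is the complete chunks
  have hA := gh_loop_chunks L divisor hpre L.length 0 [] (by omega) (by simp)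
  simp only [Nat.cast_zero, List.nil_append] at hA
  rw [PySem.Str.len_eq, ← hL, hA, List.drop_zero]
  -- B's comprehension is the same chunks
  rw [← hdcast, PySem.Int.floordiv_natCast, PySem.List.pyRange_zero_nat,
    List.map_map]
  simp only [Int.toNat_natCast]
  rw [← chunks_map d hdpos L]
  apply List.map_congr_left
  intro i _
  simp only [Function.comp]
  rw [str_slice_ofList, ← hL]
  congr 1
  have h1 : (i : Int) * d = ((i * d : Nat) : Int) := by push_cast; ring
  have h2 : ((i : Int) + 1) * d = ((i * d : Nat) : Int) + (d : Int) := by push_cast; ring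
  rw [h1, h2, PySem.List.slice_natCast_add]
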